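-- pv_equiv track=rewrite | github.com/PeterBeattie19/HackerRank | Algorithms/BitManipulation/FlippingBits.py | flippingBits
-- ===== SOURCE A (Python) =====
-- def flippingBits(N):
--     # Complete this function
--     res = ""
--     s = bin(N)[2:]
--
--     if len(s) < 32:
--         s = ("0")*(32 - len(s)) + s
--     for i in s:
--         res += "0" if i == '1' else "1"
--
--
--     return int(res,2)
-- ===== SOURCE B (Python) =====
-- def flippingBits(N):
--     # Flip the bits arithmetically: XOR with an all-ones mask at least 32 bits wide.
--     return N ^ ((1 << max(32, N.bit_length())) - 1)
-- ===== Notes on version B (the rewrite author's own statement) =====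
-- stated objective: idiomatic
-- what changed: Replaces the bin()/string-pad/char-loop/int(,2) round trip by a single arithmetic XOR with an all-ones mask of width max(32, N.bit_length()).
-- outside the precondition, e.g. on flippingBits(-5): A returns 4294967290, B returns -4294967292
import Mathlib
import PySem

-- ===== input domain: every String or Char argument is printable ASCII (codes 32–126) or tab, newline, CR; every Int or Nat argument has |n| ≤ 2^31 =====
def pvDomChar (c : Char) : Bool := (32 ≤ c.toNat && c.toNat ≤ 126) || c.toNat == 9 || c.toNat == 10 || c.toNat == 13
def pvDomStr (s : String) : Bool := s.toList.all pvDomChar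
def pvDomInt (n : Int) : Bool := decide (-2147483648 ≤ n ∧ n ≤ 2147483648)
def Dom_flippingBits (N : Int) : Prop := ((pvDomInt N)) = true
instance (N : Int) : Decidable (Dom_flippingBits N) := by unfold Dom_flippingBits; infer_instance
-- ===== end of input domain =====

-- B replaces A's bin()/pad/char-loop/int(,2) string round trip by one arithmetic XOR with an
-- all-ones mask (idiomatic; equivalence is claimed on the problem's natural domain, non-negative N).

-- ===== PORT A =====
-- one step of int(res, 2): acc*2 + digit
def pvStep (a : Int) (c : Char) : Int := 2 * a + (if c = '1' then 1 else 0)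
-- int(res, 2) where res is a nonempty string of '0'/'1' characters only (no sign, space,
-- underscore or prefix) — which is the only shape A ever feeds it; exact there.
def pvParse2 (cs : List Char) : Int := cs.foldl pvStep 0

def flippingBits (N : Int) : Int :=
  -- s = bin(N)[2:]   (bin via PySem.Int.toBinChars0b, exact also for negative N)
  let s0 : List Char := (PySem.Int.toBinChars0b N).drop 2
  -- if len(s) < 32: s = "0"*(32-len(s)) + s
  let s : List Char := if s0.length < 32 then List.replicate (32 - s0.length) '0' ++ s0 else s0
  -- for i in s: res += "0" if i == '1' else "1"
  let res : List Char := s.foldl (fun r c => r ++ [if c = '1' then '0' else '1']) []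
  -- return int(res, 2)
  pvParse2 res

-- ===== PORT B =====
def flippingBits_alt (N : Int) : Int :=
  PySem.Int.bxor N ((1 <<< (max 32 (PySem.Int.bitLength N))) - 1)

-- ===== PRECONDITION & SPEC =====
-- Pre_ restricts to the problem's natural domain, non-negative N (flip a 32-bit unsigned value): A never
-- raises on negative N but its positive value there is an artefact of bin()'s '-0b' prefix
-- being flipped character-wise, while B's natural XOR gives a negative result.
def Pre_flippingBits (N : Int) : Prop := 0 ≤ N
instance (N : Int) : Decidable (Pre_flippingBits N) := by unfold Pre_flippingBits; infer_instance
def pvWitness_flippingBits : Int := 5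

def Spec_flippingBits (N : Int) (out : Int) : Prop := out = flippingBits_alt N
instance (N : Int) (out : Int) : Decidable (Spec_flippingBits N out) := by unfold Spec_flippingBits; infer_instance

-- ===== CLAIM (what is proved, stated in full; the proofs are below) =====
def Claim_equal_flippingBits : Prop := ∀ (N : Int), Dom_flippingBits N → Pre_flippingBits N → Spec_flippingBits N (flippingBits N)

-- ===== LEMMAS AND PROOFS =====

-- reference binary digits (most significant first), used only by the proofs
def pvBin : Nat → List Char
  | n => if h : n = 0 then [] else pvBin (n / 2) ++ [Nat.digitChar (n % 2)]
decreasing_by exact Nat.div_lt_self (Nat.pos_of_ne_zero h) one_lt_two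

theorem pvParse2_acc (cs : List Char) : ∀ a : Int,
    cs.foldl pvStep a = a * 2 ^ cs.length + pvParse2 cs := by
  induction cs with
  | nil => intro a; simp [pvParse2]
  | cons c t ih =>
    intro a
    have h1 := ih (pvStep a c)
    have h2 := ih (pvStep 0 c)
    simp only [pvParse2, List.foldl_cons, List.length_cons] at *
    rw [h1, h2]
    simp only [pvStep]
    ring

theorem pvParse2_append (xs ys : List Char) :
    pvParse2 (xs ++ ys) = pvParse2 xs * 2 ^ ys.length + pvParse2 ys := by
  simp only [pvParse2, List.foldl_append]
  rw [pvParse2_acc ys (List.foldl pvStep 0 xs)]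
  rfl

theorem pvParse2_replicate_zero (k : Nat) : pvParse2 (List.replicate k '0') = 0 := by
  induction k with
  | zero => rfl
  | succ k ih =>
    rw [List.replicate_succ]
    simpa [pvParse2, pvStep] using ih

theorem pvParse2_flip (cs : List Char) (hb : ∀ c ∈ cs, c = '0' ∨ c = '1') :
    pvParse2 (cs.map (fun c => if c = '1' then '0' else '1')) =
      2 ^ cs.length - 1 - pvParse2 cs := by
  induction cs with
  | nil => simp [pvParse2]
  | cons c t ih =>
    have hc := hb c List.mem_cons_self
    have ht := ih (fun x hx => hb x (List.mem_cons_of_mem c hx))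
    have e1 : pvParse2 ((if c = '1' then '0' else '1') :: t.map (fun c => if c = '1' then '0' else '1')) =
        pvStep 0 (if c = '1' then '0' else '1') * 2 ^ t.length +
          pvParse2 (t.map (fun c => if c = '1' then '0' else '1')) := by
      simpa [pvParse2] using pvParse2_acc (t.map (fun c => if c = '1' then '0' else '1')) (pvStep 0 (if c = '1' then '0' else '1'))
    have e2 : pvParse2 (c :: t) = pvStep 0 c * 2 ^ t.length + pvParse2 t := by
      simpa [pvParse2] using pvParse2_acc t (pvStep 0 c)
    simp only [List.map_cons, List.length_cons]
    rw [e1, e2, ht]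
    rcases hc with h | h <;> subst h <;> simp [pvStep] <;> ring

theorem pvBin_bits : ∀ n, ∀ c ∈ pvBin n, c = '0' ∨ c = '1' := by
  intro n
  induction n using Nat.strong_induction_on with
  | _ n ih =>
    rw [pvBin]
    by_cases h : n = 0
    · simp [h]
    · simp only [h, dif_neg, not_false_iff, List.mem_append, List.mem_singleton]
      intro c hc
      rcases hc with hc | hc
      · exact ih (n / 2) (Nat.div_lt_self (Nat.pos_of_ne_zero h) one_lt_two) c hc
      · subst hc
        rcases Nat.mod_two_eq_zero_or_one n with h2 | h2 <;> rw [h2] <;> simp [Nat.digitChar]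

theorem pvParse2_pvBin : ∀ n : Nat, pvParse2 (pvBin n) = (n : Int) := by
  intro n
  induction n using Nat.strong_induction_on with
  | _ n ih =>
    rw [pvBin]
    by_cases h : n = 0
    · simp [h, pvParse2]
    · rw [dif_neg h, pvParse2_append, ih (n / 2) (Nat.div_lt_self (Nat.pos_of_ne_zero h) one_lt_two)]
      have hmod := Nat.div_add_mod n 2
      rcases Nat.mod_two_eq_zero_or_one n with h2 | h2 <;>
        · rw [h2] <;> simp [pvParse2, pvStep, Nat.digitChar] <;> push_cast <;> omega

theorem pvBin_length_le : ∀ k n : Nat, n < 2 ^ k → (pvBin n).length ≤ k := by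
  intro k
  induction k with
  | zero =>
    intro n hn
    have : n = 0 := by omega
    subst this; rw [pvBin]; simp
  | succ k ih =>
    intro n hn
    rw [pvBin]
    by_cases h : n = 0
    · simp [h]
    · rw [dif_neg h]
      have hd : n / 2 < 2 ^ k := by
        have : 2 ^ (k + 1) = 2 * 2 ^ k := by ring
        omega
      have := ih (n / 2) hd
      simp only [List.length_append, List.length_singleton]
      omega

theorem toDigitsCore_two_eq : ∀ (f n : Nat) (acc : List Char), n ≠ 0 → n < 2 ^ f →
    Nat.toDigitsCore 2 f n acc = pvBin n ++ acc := by
  intro f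
  induction f with
  | zero => intro n acc h0 hf; omega
  | succ f ih =>
    intro n acc h0 hf
    rw [Nat.toDigitsCore]
    by_cases h2 : n / 2 = 0
    · have hn1 : n = 1 := by omega
      subst hn1
      norm_num
      rw [pvBin]
      norm_num
      rw [pvBin]
      simp [Nat.digitChar]
    · rw [if_neg h2]
      have hd : n / 2 < 2 ^ f := by
        have : 2 ^ (f + 1) = 2 * 2 ^ f := by ring
        omega
      rw [ih (n / 2) _ h2 hd]
      conv_rhs => rw [pvBin]
      rw [dif_neg h0, List.append_assoc]
      rfl

theorem toDigits_two_eq (n : Nat) :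
    Nat.toDigits 2 n = if n = 0 then ['0'] else pvBin n := by
  by_cases h : n = 0
  · subst h; decide
  · rw [if_neg h, Nat.toDigits]
    have : n < 2 ^ (n + 1) := by
      calc n < 2 ^ n := Nat.lt_two_pow_self
        _ ≤ 2 ^ (n + 1) := Nat.pow_le_pow_right (by norm_num) (Nat.le_succ n)
    simpa using toDigitsCore_two_eq (n + 1) n [] h this

-- n XOR (2^w - 1) complements the low w bits
theorem xor_mask : ∀ (w n : Nat), n < 2 ^ w → n ^^^ (2 ^ w - 1) = 2 ^ w - 1 - n := by
  intro w
  induction w with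
  | zero => intro n hn; interval_cases n; decide
  | succ w ih =>
    intro n hn
    have hp : 2 ^ (w + 1) = 2 * 2 ^ w := by ring
    have hq : n / 2 < 2 ^ w := by omega
    have hkey := ih (n / 2) hq
    have hb1 : n = Nat.bit (decide (n % 2 = 1)) (n / 2) := by
      rcases Nat.mod_two_eq_zero_or_one n with h | h <;> simp [Nat.bit, h] <;> omega
    have hb2 : 2 ^ (w + 1) - 1 = Nat.bit true (2 ^ w - 1) := by
      simp [Nat.bit]
      omega
    rw [hb1, hb2, Nat.xor_bit, hkey]
    rcases Nat.mod_two_eq_zero_or_one n with h | h <;> simp [Nat.bit, h] <;> omega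

theorem bitLength_le_32 (N : Int) (h0 : 0 ≤ N) (h : N ≤ 2147483648) :
    PySem.Int.bitLength N ≤ 32 := by
  by_cases hz : N = 0
  · subst hz; rw [PySem.Int.bitLength_zero]; omega
  · by_contra hgt
    have h1 := PySem.Int.two_pow_bitLength_le N hz
    have h2 : (2 : Nat) ^ 32 ≤ 2 ^ (PySem.Int.bitLength N - 1) :=
      Nat.pow_le_pow_right (by norm_num) (by omega)
    have h3 : N.natAbs ≤ 2147483648 := by omega
    have : (2 : Nat) ^ 32 ≤ 2147483648 := le_trans h2 (le_trans h1 h3)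
    norm_num at this

-- ===== VERDICT (by name: the statement is the Claim_ definition above) =====
theorem flippingBits_spec : Claim_equal_flippingBits := by
  intro N hdom hpre
  unfold Spec_flippingBits
  have hN : N ≤ 2147483648 := by
    simp only [Dom_flippingBits, pvDomInt, decide_eq_true_eq] at hdom
    exact hdom.2
  set n : Nat := N.toNat with hn
  have hNn : N = (n : Int) := (Int.toNat_of_nonneg hpre).symm
  have hn32 : n < 2 ^ 32 := by omega
  -- A side
  have hA : flippingBits N = 2 ^ 32 - 1 - (n : Int) := by
    rw [flippingBits]
    have hpos : ¬ N < 0 := by omega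
    have hs0 : (PySem.Int.toBinChars0b N).drop 2 = Nat.toDigits 2 n := by
      rw [PySem.Int.toBinChars0b, if_neg hpos]
      rfl
    rw [hs0, toDigits_two_eq]
    set ds : List Char := if n = 0 then ['0'] else pvBin n with hds
    have hbits : ∀ c ∈ ds, c = '0' ∨ c = '1' := by
      rw [hds]; split
      · intro c hc; simp at hc; subst hc; left; rfl
      · exact pvBin_bits n
    have hval : pvParse2 ds = (n : Int) := by
      rw [hds]; split
      · rename_i h; rw [h]; rfl
      · exact pvParse2_pvBin n
    have hlen : ds.length ≤ 32 := by
      rw [hds]; split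
      · simp
      · exact pvBin_length_le 32 n hn32
    set s : List Char :=
      if ds.length < 32 then List.replicate (32 - ds.length) '0' ++ ds else ds with hsdef
    have hsbits : ∀ c ∈ s, c = '0' ∨ c = '1' := by
      rw [hsdef]; split
      · intro c hc
        rcases List.mem_append.mp hc with hc | hc
        · left; exact List.eq_of_mem_replicate hc
        · exact hbits c hc
      · exact hbits
    have hslen : s.length = 32 := by
      rw [hsdef]; split
      · rename_i hlt
        rw [List.length_append, List.length_replicate]
        omega
      · omega
    have hsval : pvParse2 s = (n : Int) := by
      rw [hsdef]; split
      · rw [pvParse2_append, pvParse2_replicate_zero, hval]; ring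
      · exact hval
    rw [PySem.List.foldl_append_singleton_eq_map, List.nil_append]
    rw [pvParse2_flip s hsbits, hslen, hsval]
  -- B side
  have hbl := bitLength_le_32 N hpre hN
  have hmax : max 32 (PySem.Int.bitLength N) = 32 := by omega
  rw [hA, flippingBits_alt, hmax]
  have hmask : (((1 <<< 32 : Nat) : Int)) - 1 = ((4294967295 : Nat) : Int) := by
    norm_num [Nat.shiftLeft_eq]
  rw [hmask, hNn, PySem.Int.bxor_natCast]
  have hx : n ^^^ 4294967295 = 2 ^ 32 - 1 - n := by
    have := xor_mask 32 n (by omega)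
    norm_num at this ⊢
    exact this
  rw [hx]
  omega
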